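-- pv_equiv track=rewrite | github.com/Adarshb2000/coding | q2.py | something
-- ===== SOURCE A (Python) =====
-- def something(numbers1, numbers2, k):
--     from collections import defaultdict as dd
--     def lowerBound(arr, low, high, el):
--         if low == high:
--             return arr[low]
--
--         mid = (low + high) // 2 + 1
--
--         if arr[mid] == el:
--             return el
--         elif arr[mid] < el:
--             return lowerBound(arr, mid, high, el)
--         else:
--             return lowerBound(arr, low, mid - 1, el)
--
--     numbers1_dict = dd(list)
--     numbers2_dict = dd(list)
--     ans = []
--     optimal = 0
--     for id_, req in numbers1:
--         numbers1_dict[req].append(id_)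
--
--     for id_, req in numbers2:
--         numbers2_dict[req].append(id_)
--
--     nums1 = list(numbers1_dict.keys())
--     nums2 = sorted(list(numbers2_dict.keys()))
--
--     for i in nums1:
--         req = k - i
--         b = lowerBound(nums2, 0, nums2.__len__() - 1, req)
--
--         if b + i <= k:
--             if b + i < optimal: continue
--             if b + i > optimal:
--                 ans = []
--                 optimal = b + i
--
--             for id1_ in numbers1_dict[i]:
--                 for id2_ in numbers2_dict[b]:
--                     ans.append([id1_, id2_])
--
--     return ans
-- ===== SOURCE B (Python) =====
-- def something(numbers1, numbers2, k):
--     d1 = {}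
--     d2 = {}
--     for id_, v in numbers1:
--         d1.setdefault(v, []).append(id_)
--     for id_, v in numbers2:
--         d2.setdefault(v, []).append(id_)
--     optimal = 0
--     for a in d1:
--         for b in d2:
--             s = a + b
--             if optimal < s <= k:
--                 optimal = s
--     ans = []
--     if optimal <= k:
--         for a in d1:
--             b = optimal - a
--             if b in d2:
--                 for id1 in d1[a]:
--                     for id2 in d2[b]:
--                         ans.append([id1, id2])
--     return ans
-- ===== Notes on version B (the rewrite author's own statement) =====
-- stated objective: simpler
-- what changed: Replaces A's per-key recursive binary search plus single-pass running-best state machine (with ans resets) by a plain two-phase scheme: a brute-force double loop over the two distinct-value key sets computes the optimal capped sum, then one straight collection pass appends the pairs for keys whose complement (optimal - key) is present.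
import Mathlib
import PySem

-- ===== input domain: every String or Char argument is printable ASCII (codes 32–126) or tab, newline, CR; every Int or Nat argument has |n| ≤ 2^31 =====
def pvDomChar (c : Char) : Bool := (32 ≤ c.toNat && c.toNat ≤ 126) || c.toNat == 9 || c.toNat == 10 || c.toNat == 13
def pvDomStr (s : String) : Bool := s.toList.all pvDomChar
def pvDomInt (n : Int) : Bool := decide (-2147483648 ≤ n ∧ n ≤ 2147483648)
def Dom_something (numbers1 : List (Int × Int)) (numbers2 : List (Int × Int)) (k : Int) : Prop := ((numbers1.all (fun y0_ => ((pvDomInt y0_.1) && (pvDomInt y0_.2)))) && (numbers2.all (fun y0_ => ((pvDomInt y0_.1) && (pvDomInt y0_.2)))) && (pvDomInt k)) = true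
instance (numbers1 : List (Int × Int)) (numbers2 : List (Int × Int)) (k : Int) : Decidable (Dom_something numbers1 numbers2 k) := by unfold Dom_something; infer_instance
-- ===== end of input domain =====

-- B replaces A's recursive binary search + running-best state machine by a brute-force
-- optimal-sum double loop over the distinct values followed by one collection pass (simpler, not faster).

-- ===== PORT A =====
-- A's recursive lowerBound; arr[..] is PySem.List.pyGet? (none = IndexError, reached only
-- outside Pre_, where 0 is returned as junk); the 'low < high' guard only makes the
-- recursion total — from the in-range top call Python maintains low ≤ high.
def lowerBoundA (arr : List Int) (low high el : Int) : Int :=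
  if low = high then (PySem.List.pyGet? arr low).getD 0
  else if hlt : low < high then
    let mid := PySem.Int.floordiv (low + high) 2 + 1
    match PySem.List.pyGet? arr mid with
    | none => 0
    | some v =>
      if v = el then el
      else if v < el then lowerBoundA arr mid high el
      else lowerBoundA arr low (mid - 1) el
  else 0
termination_by (high - low).toNat
decreasing_by
  · have h1 := (PySem.Int.le_floordiv_iff_mul_le (a := low + high) (b := 2) (q := low) (by omega)).2 (by omega)
    have h2 := (PySem.Int.floordiv_lt_iff_lt_mul (a := low + high) (b := 2) (q := high) (by omega)).2 (by omega)
    omega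
  · have h1 := (PySem.Int.le_floordiv_iff_mul_le (a := low + high) (b := 2) (q := low) (by omega)).2 (by omega)
    have h2 := (PySem.Int.floordiv_lt_iff_lt_mul (a := low + high) (b := 2) (q := high) (by omega)).2 (by omega)
    omega

-- defaultdict __getitem__ reads (numbers1_dict[i], numbers2_dict[b]) are ported as getD _ [];
-- inside Pre_ they only ever hit existing keys, so no default entry is ever inserted.
def something (numbers1 : List (Int × Int)) (numbers2 : List (Int × Int)) (k : Int) : List (List Int) :=
  let numbers1_dict := numbers1.foldl (fun d p => d.modify p.2 [] (fun ids => ids ++ [p.1])) PySem.Dict.empty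
  let numbers2_dict := numbers2.foldl (fun d p => d.modify p.2 [] (fun ids => ids ++ [p.1])) PySem.Dict.empty
  let nums1 := numbers1_dict.keys
  let nums2 := PySem.List.sorted numbers2_dict.keys (fun x => x) false
  let res := nums1.foldl (fun (st : List (List Int) × Int) i =>
    let b := lowerBoundA nums2 0 ((nums2.length : Int) - 1) (k - i)
    if b + i ≤ k then
      if b + i < st.2 then st
      else
        let ans0 := if st.2 < b + i then ([] : List (List Int)) else st.1
        let opt := if st.2 < b + i then b + i else st.2
        ((numbers1_dict.getD i []).foldl (fun a id1 =>
            (numbers2_dict.getD b []).foldl (fun a2 id2 => a2 ++ [[id1, id2]]) a) ans0, opt)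
    else st) (([] : List (List Int)), (0 : Int))
  res.1

-- ===== PORT B =====
def something_alt (numbers1 : List (Int × Int)) (numbers2 : List (Int × Int)) (k : Int) : List (List Int) :=
  let d1 := numbers1.foldl (fun d p => d.modify p.2 [] (fun ids => ids ++ [p.1])) PySem.Dict.empty
  let d2 := numbers2.foldl (fun d p => d.modify p.2 [] (fun ids => ids ++ [p.1])) PySem.Dict.empty
  let optimal := d1.keys.foldl (fun o a =>
      d2.keys.foldl (fun o b => if o < a + b ∧ a + b ≤ k then a + b else o) o) 0
  if optimal ≤ k then
    d1.keys.foldl (fun ans a =>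
      if d2.contains (optimal - a) then
        (d1.getD a []).foldl (fun acc id1 =>
          (d2.getD (optimal - a) []).foldl (fun acc2 id2 => acc2 ++ [[id1, id2]]) acc) ans
      else ans) ([] : List (List Int))
  else []

-- ===== PRECONDITION & SPEC =====
-- Pre_ excludes exactly the inputs where A raises: numbers1 non-empty with numbers2 empty
-- (lowerBound then indexes arr[0] of the empty key list — IndexError).
def Pre_something (numbers1 : List (Int × Int)) (numbers2 : List (Int × Int)) (k : Int) : Prop :=
  numbers1 = [] ∨ numbers2 ≠ []
instance (numbers1 : List (Int × Int)) (numbers2 : List (Int × Int)) (k : Int) : Decidable (Pre_something numbers1 numbers2 k) := by unfold Pre_something; infer_instance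
def pvWitness_something : (List (Int × Int)) × (List (Int × Int)) × Int := ([(1, 1)], [(2, 2)], 3)

def Spec_something (numbers1 : List (Int × Int)) (numbers2 : List (Int × Int)) (k : Int) (out : List (List Int)) : Prop := out = something_alt numbers1 numbers2 k
instance (numbers1 : List (Int × Int)) (numbers2 : List (Int × Int)) (k : Int) (out : List (List Int)) : Decidable (Spec_something numbers1 numbers2 k out) := by unfold Spec_something; infer_instance

-- ===== CLAIM (what is proved, stated in full; the proofs are below) =====
def Claim_equal_something : Prop := ∀ (numbers1 : List (Int × Int)) (numbers2 : List (Int × Int)) (k : Int), Dom_something numbers1 numbers2 k → Pre_something numbers1 numbers2 k → Spec_something numbers1 numbers2 k (something numbers1 numbers2 k)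

-- ===== LEMMAS AND PROOFS =====

-- the value → ids grouping dict both ports build
def pvGrp (l : List (Int × Int)) : PySem.Dict Int (List Int) :=
  l.foldl (fun d p => d.modify p.2 [] (fun ids => ids ++ [p.1])) PySem.Dict.empty

lemma pvGrp_mem_keys (l : List (Int × Int)) (v : Int) :
    v ∈ (pvGrp l).keys ↔ v ∈ l.map (·.2) := by
  have h := PySem.Dict.keys_foldl_modify_key l (fun p => p.2) [] (fun _ p ids => ids ++ [p.1]) (PySem.Dict.empty : PySem.Dict Int (List Int))
  unfold pvGrp
  rw [show (l.foldl (fun d p => d.modify p.2 [] (fun ids => ids ++ [p.1])) PySem.Dict.empty).keys = PySem.Set.update (PySem.Dict.empty : PySem.Dict Int (List Int)).keys (l.map (fun p => p.2)) from h]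
  simp [PySem.Set.mem_update, PySem.Dict.keys_empty]

-- the sorted distinct-value list of numbers2, A's lowerBound on it, and the appended pairs
def pvS2 (n2 : List (Int × Int)) : List Int :=
  PySem.List.sorted (pvGrp n2).keys (fun x => x) false
def pvB (n2 : List (Int × Int)) (k i : Int) : Int :=
  lowerBoundA (pvS2 n2) 0 (((pvS2 n2).length : Int) - 1) (k - i)
def pvCand (n2 : List (Int × Int)) (k i : Int) : Int := pvB n2 k i + i
def pvP (n1 n2 : List (Int × Int)) (k i : Int) : List (List Int) :=
  ((pvGrp n1).getD i []).flatMap (fun id1 => ((pvGrp n2).getD (pvB n2 k i) []).map (fun id2 => [id1, id2]))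

def pvIsBest (l : List Int) (el r : Int) : Prop := r ∈ l ∧ r ≤ el ∧ ∀ x ∈ l, x ≤ el → x ≤ r

lemma pv_sorted_mono (arr : List Int) (hs : arr.Pairwise (· ≤ ·)) (i j : Nat)
    (hij : i ≤ j) (hj : j < arr.length) : arr[i]'(by omega) ≤ arr[j] := by
  rcases Nat.lt_or_ge i j with h | h
  · exact (List.pairwise_iff_getElem.1 hs) i j (by omega) hj h
  · have : i = j := by omega
    subst this; exact le_refl _

lemma pvLB_base (arr : List Int) (el low : Int) (h0 : 0 ≤ low) (hh : low < (arr.length : Int)) :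
    lowerBoundA arr low low el = arr[low.toNat]'(by omega) := by
  rw [lowerBoundA, if_pos rfl]
  have hsome : PySem.List.pyGet? arr low = some (arr[low.toNat]'(by omega)) := by
    conv_lhs => rw [show low = ((low.toNat : Nat) : Int) from by omega]
    rw [PySem.List.pyGet?_natCast, List.getElem?_eq_getElem (by omega)]
  rw [hsome]
  rfl

lemma pvLB_spec (arr : List Int) (hs : arr.Pairwise (· ≤ ·)) (el : Int) :
    ∀ (n : Nat) (low high : Int), (high - low).toNat ≤ n → 0 ≤ low → low ≤ high →
      high < (arr.length : Int) →
    (∃ j : Nat, low ≤ (j : Int) ∧ (j : Int) ≤ high ∧ ∃ hj : j < arr.length,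
        lowerBoundA arr low high el = arr[j]) ∧
    (∀ j : Nat, low ≤ (j : Int) → (j : Int) ≤ high → ∀ hj : j < arr.length, arr[j] ≤ el →
        arr[j] ≤ lowerBoundA arr low high el ∧ lowerBoundA arr low high el ≤ el) := by
  intro n
  induction n with
  | zero =>
    intro low high hn h0 hlh hh
    have heq : low = high := by omega
    subst heq
    rw [pvLB_base arr el low h0 hh]
    constructor
    · exact ⟨low.toNat, by omega, by omega, by omega, rfl⟩
    · intro j hj1 hj2 hj hle
      have : j = low.toNat := by omega
      subst this
      exact ⟨le_refl _, hle⟩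
  | succ m ih =>
    intro low high hn h0 hlh hh
    by_cases heq : low = high
    · subst heq
      rw [pvLB_base arr el low h0 hh]
      constructor
      · exact ⟨low.toNat, by omega, by omega, by omega, rfl⟩
      · intro j hj1 hj2 hj hle
        have : j = low.toNat := by omega
        subst this
        exact ⟨le_refl _, hle⟩
    · have hlt : low < high := lt_of_le_of_ne hlh heq
      have hm1 := (PySem.Int.le_floordiv_iff_mul_le (a := low + high) (b := 2) (q := low) (by omega)).2 (by omega)
      have hm2 := (PySem.Int.floordiv_lt_iff_lt_mul (a := low + high) (b := 2) (q := high) (by omega)).2 (by omega)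
      set mid := PySem.Int.floordiv (low + high) 2 + 1 with hmiddef
      have hml : mid.toNat < arr.length := by omega
      have hsome : PySem.List.pyGet? arr mid = some (arr[mid.toNat]'hml) := by
        conv_lhs => rw [show mid = ((mid.toNat : Nat) : Int) from by omega]
        rw [PySem.List.pyGet?_natCast, List.getElem?_eq_getElem hml]
      have hrw : lowerBoundA arr low high el =
          (if arr[mid.toNat] = el then el
           else if arr[mid.toNat] < el then lowerBoundA arr mid high el
           else lowerBoundA arr low (mid - 1) el) := by
        rw [lowerBoundA, if_neg heq, dif_pos hlt]
        simp only [← hmiddef, hsome]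
      by_cases hveq : arr[mid.toNat] = el
      · rw [hrw, if_pos hveq]
        constructor
        · exact ⟨mid.toNat, by omega, by omega, hml, hveq.symm⟩
        · intro j hj1 hj2 hj hle
          exact ⟨hle, le_refl _⟩
      · by_cases hvlt : arr[mid.toNat] < el
        · rw [hrw, if_neg hveq, if_pos hvlt]
          obtain ⟨⟨j, hj1, hj2, hj, hrj⟩, hbest⟩ :=
            ih mid high (by omega) (by omega) (by omega) hh
          constructor
          · exact ⟨j, by omega, hj2, hj, hrj⟩
          · intro j' h1 h2 hj' hle
            by_cases hc : mid ≤ (j' : Int)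
            · exact hbest j' hc h2 hj' hle
            · have h3 : arr[j'] ≤ arr[mid.toNat] := pv_sorted_mono arr hs j' mid.toNat (by omega) hml
              have h4 := hbest mid.toNat (by omega) (by omega) hml (le_of_lt hvlt)
              exact ⟨le_trans h3 h4.1, h4.2⟩
        · rw [hrw, if_neg hveq, if_neg hvlt]
          obtain ⟨⟨j, hj1, hj2, hj, hrj⟩, hbest⟩ :=
            ih low (mid - 1) (by omega) h0 (by omega) (by omega)
          constructor
          · exact ⟨j, hj1, by omega, hj, hrj⟩
          · intro j' h1 h2 hj' hle
            have hup : (j' : Int) ≤ mid - 1 := by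
              by_contra hcon
              have hge : mid.toNat ≤ j' := by omega
              have := pv_sorted_mono arr hs mid.toNat j' hge hj'
              omega
            exact hbest j' h1 hup hj' hle

lemma pvLB_top (arr : List Int) (hs : arr.Pairwise (· ≤ ·)) (hne : arr ≠ []) (el : Int) :
    lowerBoundA arr 0 ((arr.length : Int) - 1) el ∈ arr ∧
    ((∃ x ∈ arr, x ≤ el) → pvIsBest arr el (lowerBoundA arr 0 ((arr.length : Int) - 1) el)) := by
  have hlen : 0 < arr.length := List.length_pos_of_ne_nil hne
  obtain ⟨⟨j, _, _, hj, hrj⟩, hbest⟩ :=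
    pvLB_spec arr hs el ((arr.length : Int) - 1).toNat 0 ((arr.length : Int) - 1)
      (by omega) (by omega) (by omega) (by omega)
  constructor
  · rw [hrj]; exact List.getElem_mem hj
  · rintro ⟨x, hx, hxle⟩
    obtain ⟨i, hi, hxi⟩ := List.getElem_of_mem hx
    have h1 := hbest i (by omega) (by omega) hi (by rw [hxi]; exact hxle)
    refine ⟨by rw [hrj]; exact List.getElem_mem hj, h1.2, ?_⟩
    intro y hy hyle
    obtain ⟨iy, hiy, hyiy⟩ := List.getElem_of_mem hy
    have h2 := hbest iy (by omega) (by omega) hiy (by rw [hyiy]; exact hyle)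
    rw [← hyiy]; exact h2.1

-- A's running best over the processed prefix
def pvOpt (cand : Int → Int) (k : Int) (L : List Int) : Int :=
  ((L.filter (fun i => decide (cand i ≤ k))).map cand).foldl max 0

lemma pvOpt_append (cand : Int → Int) (k : Int) (L : List Int) (i : Int) :
    pvOpt cand k (L ++ [i]) = if cand i ≤ k then max (pvOpt cand k L) (cand i) else pvOpt cand k L := by
  unfold pvOpt
  rw [List.filter_append, List.map_append, List.foldl_append]
  by_cases h : cand i ≤ k
  · simp [h]
  · simp [h]

lemma pvOpt_nonneg (cand : Int → Int) (k : Int) (L : List Int) : 0 ≤ pvOpt cand k L :=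
  (PySem.List.le_foldl_max _ 0).1

lemma pvOpt_ub (cand : Int → Int) (k : Int) (L : List Int) (i : Int) (hi : i ∈ L)
    (hk : cand i ≤ k) : cand i ≤ pvOpt cand k L := by
  refine (PySem.List.le_foldl_max _ 0).2 _ ?_
  exact List.mem_map_of_mem (List.mem_filter.2 ⟨hi, by simpa⟩)

lemma pvOpt_mem (cand : Int → Int) (k : Int) (L : List Int) :
    pvOpt cand k L = 0 ∨ ∃ i ∈ L, cand i ≤ k ∧ cand i = pvOpt cand k L := by
  rcases PySem.List.foldl_max_mem ((L.filter (fun i => decide (cand i ≤ k))).map cand) 0 with h | h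
  · exact Or.inl h
  · obtain ⟨i, hi, hci⟩ := List.mem_map.1 h
    obtain ⟨hiL, hik⟩ := List.mem_filter.1 hi
    exact Or.inr ⟨i, hiL, by simpa using hik, hci⟩

-- A's main loop with state (ans, optimal), abstracted over cand and the appended pairs P
lemma pvA_loop (cand : Int → Int) (P : Int → List (List Int)) (k : Int) (L : List Int) :
    L.foldl (fun (st : List (List Int) × Int) i =>
      if cand i ≤ k then
        if cand i < st.2 then st
        else ((if st.2 < cand i then [] else st.1) ++ P i,
              if st.2 < cand i then cand i else st.2)
      else st) ([], 0)
    = ((L.filter (fun i => decide (cand i ≤ k) && decide (cand i = pvOpt cand k L))).flatMap P,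
       pvOpt cand k L) := by
  induction L using List.reverseRecOn with
  | nil => simp [pvOpt]
  | append_singleton L i ih =>
    rw [List.foldl_append, ih, List.foldl_cons, List.foldl_nil, pvOpt_append]
    by_cases hk : cand i ≤ k
    · simp only [hk, if_pos]
      by_cases hlt : cand i < pvOpt cand k L
      · rw [if_pos hlt]
        have hmax : max (pvOpt cand k L) (cand i) = pvOpt cand k L := by omega
        rw [hmax, List.filter_append]
        have : List.filter (fun j => decide (cand j ≤ k) && decide (cand j = pvOpt cand k L)) [i] = [] := by
          simp only [List.filter_cons, List.filter_nil]
          have : ¬ (cand i = pvOpt cand k L) := by omega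
          simp [this]
        rw [this, List.append_nil]
      · rw [if_neg hlt]
        by_cases hgt : pvOpt cand k L < cand i
        · rw [if_pos hgt, if_pos hgt]
          have hmax : max (pvOpt cand k L) (cand i) = cand i := by omega
          rw [hmax, List.filter_append]
          have h1 : List.filter (fun j => decide (cand j ≤ k) && decide (cand j = cand i)) L = [] := by
            rw [List.filter_eq_nil_iff]
            intro j hj
            simp only [Bool.and_eq_true, decide_eq_true_eq, not_and]
            intro hjk
            have := pvOpt_ub cand k L j hj hjk
            omega
          have h2 : List.filter (fun j => decide (cand j ≤ k) && decide (cand j = cand i)) [i] = [i] := by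
            simp [hk]
          rw [h1, h2]
          simp
        · have heq : cand i = pvOpt cand k L := by omega
          rw [if_neg hgt, if_neg hgt]
          have hmax : max (pvOpt cand k L) (cand i) = pvOpt cand k L := by omega
          rw [hmax, List.filter_append]
          have h2 : List.filter (fun j => decide (cand j ≤ k) && decide (cand j = pvOpt cand k L)) [i] = [i] := by
            have hok : pvOpt cand k L ≤ k := heq ▸ hk
            simp [hok, heq]
          rw [h2, List.flatMap_append]
          simp
    · simp only [hk, if_false]
      rw [List.filter_append]
      have : List.filter (fun j => decide (cand j ≤ k) && decide (cand j = pvOpt cand k L)) [i] = [] := by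
        simp [hk]
      rw [this, List.append_nil]

-- the nested append loops of either port produce acc ++ (all pairs)
lemma pvPairs_fold (ids1 ids2 : List Int) (acc : List (List Int)) :
    ids1.foldl (fun a id1 => ids2.foldl (fun a2 id2 => a2 ++ [[id1, id2]]) a) acc
    = acc ++ ids1.flatMap (fun id1 => ids2.map (fun id2 => [id1, id2])) := by
  have h1 : ids1.foldl (fun a id1 => ids2.foldl (fun a2 id2 => a2 ++ [[id1, id2]]) a) acc
      = ids1.foldl (fun a id1 => a ++ ids2.map (fun id2 => [id1, id2])) acc :=
    PySem.List.foldl_congr_mem ids1 _ _ acc (by intro a x _; exact PySem.List.foldl_append_singleton_eq_map _ _ _)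
  rw [h1]
  exact PySem.List.foldl_append_eq_flatMap _ _ _

-- B's running max over an inner candidate list
lemma pvB_max (f : Int → Int) (k : Int) (l : List Int) (o : Int) :
    l.foldl (fun o x => if o < f x ∧ f x ≤ k then f x else o) o
    = ((l.filter (fun x => decide (f x ≤ k))).map f).foldl max o := by
  induction l generalizing o with
  | nil => rfl
  | cons x t ih =>
    simp only [List.foldl_cons, List.filter_cons]
    by_cases h : f x ≤ k
    · simp only [h, decide_true, if_pos, List.map_cons, List.foldl_cons]
      rw [ih]
      congr 1
      by_cases h2 : o < f x <;> simp [h2] <;> omega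
    · simp only [h, decide_false]
      rw [ih]
      congr 1
      simp [h]

lemma pv_fold_max_props (g : Int → List Int) (L : List Int) (o : Int) :
    o ≤ L.foldl (fun o a => (g a).foldl max o) o ∧
    (∀ a ∈ L, ∀ y ∈ g a, y ≤ L.foldl (fun o a => (g a).foldl max o) o) ∧
    (L.foldl (fun o a => (g a).foldl max o) o = o ∨
      ∃ a ∈ L, L.foldl (fun o a => (g a).foldl max o) o ∈ g a) := by
  induction L generalizing o with
  | nil => simp
  | cons a t ih =>
    simp only [List.foldl_cons]
    have hstep := PySem.List.le_foldl_max (g a) o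
    obtain ⟨ih1, ih2, ih3⟩ := ih ((g a).foldl max o)
    refine ⟨le_trans hstep.1 ih1, ?_, ?_⟩
    · intro a' ha' y hy
      rcases List.mem_cons.1 ha' with h | h
      · subst h; exact le_trans (hstep.2 y hy) ih1
      · exact ih2 a' h y hy
    · rcases ih3 with h | ⟨a', ha', hm⟩
      · rcases PySem.List.foldl_max_mem (g a) o with h2 | h2
        · exact Or.inl (h.trans h2)
        · refine Or.inr ⟨a, List.mem_cons_self .., ?_⟩
          rw [h]; exact h2
      · exact Or.inr ⟨a', List.mem_cons_of_mem _ ha', hm⟩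

-- normal form of port A
lemma pvA_eval (n1 n2 : List (Int × Int)) (k : Int) :
    something n1 n2 k =
      ((pvGrp n1).keys.filter (fun i => decide (pvCand n2 k i ≤ k) &&
          decide (pvCand n2 k i = pvOpt (pvCand n2 k) k (pvGrp n1).keys))).flatMap (pvP n1 n2 k) := by
  unfold something
  simp only []
  show (List.foldl (fun (st : List (List Int) × Int) i =>
      if pvB n2 k i + i ≤ k then
        if pvB n2 k i + i < st.2 then st
        else (((pvGrp n1).getD i []).foldl (fun a id1 =>
            ((pvGrp n2).getD (pvB n2 k i) []).foldl (fun a2 id2 => a2 ++ [[id1, id2]]) a)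
            (if st.2 < pvB n2 k i + i then [] else st.1),
          if st.2 < pvB n2 k i + i then pvB n2 k i + i else st.2)
      else st) ([], 0) (pvGrp n1).keys).1
    = ((pvGrp n1).keys.filter (fun i => decide (pvCand n2 k i ≤ k) &&
        decide (pvCand n2 k i = pvOpt (pvCand n2 k) k (pvGrp n1).keys))).flatMap (pvP n1 n2 k)
  have hfun : ∀ (st : List (List Int) × Int), ∀ i ∈ (pvGrp n1).keys,
      (if pvB n2 k i + i ≤ k then
        if pvB n2 k i + i < st.2 then st
        else (((pvGrp n1).getD i []).foldl (fun a id1 =>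
            ((pvGrp n2).getD (pvB n2 k i) []).foldl (fun a2 id2 => a2 ++ [[id1, id2]]) a)
            (if st.2 < pvB n2 k i + i then [] else st.1),
          if st.2 < pvB n2 k i + i then pvB n2 k i + i else st.2)
      else st)
      = (if pvCand n2 k i ≤ k then
          if pvCand n2 k i < st.2 then st
          else ((if st.2 < pvCand n2 k i then [] else st.1) ++ pvP n1 n2 k i,
                if st.2 < pvCand n2 k i then pvCand n2 k i else st.2)
        else st) := by
    intro st i _
    simp only [pvCand]
    by_cases hc1 : pvB n2 k i + i ≤ k
    · rw [if_pos hc1, if_pos hc1]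
      by_cases hc2 : pvB n2 k i + i < st.2
      · rw [if_pos hc2, if_pos hc2]
      · rw [if_neg hc2, if_neg hc2]
        rw [pvPairs_fold]
        rfl
    · rw [if_neg hc1, if_neg hc1]
  rw [PySem.List.foldl_congr_mem (pvGrp n1).keys _
      (fun (st : List (List Int) × Int) i =>
        if pvCand n2 k i ≤ k then
          if pvCand n2 k i < st.2 then st
          else ((if st.2 < pvCand n2 k i then [] else st.1) ++ pvP n1 n2 k i,
                if st.2 < pvCand n2 k i then pvCand n2 k i else st.2)
        else st) ([], 0) (fun st i hi => hfun st i hi)]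
  rw [pvA_loop (pvCand n2 k) (pvP n1 n2 k) k (pvGrp n1).keys]

-- B's optimal as a nested running max
def pvG (n2 : List (Int × Int)) (k a : Int) : List Int :=
  (((pvGrp n2).keys.filter (fun b => decide (a + b ≤ k))).map (fun b => a + b))

def pvOptB (n1 n2 : List (Int × Int)) (k : Int) : Int :=
  (pvGrp n1).keys.foldl (fun o a => (pvG n2 k a).foldl max o) 0

-- normal form of port B
lemma pvB_eval (n1 n2 : List (Int × Int)) (k : Int) :
    something_alt n1 n2 k =
      (if pvOptB n1 n2 k ≤ k then
        ((pvGrp n1).keys.filter (fun a => (pvGrp n2).contains (pvOptB n1 n2 k - a))).flatMap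
          (fun a => ((pvGrp n1).getD a []).flatMap
            (fun id1 => ((pvGrp n2).getD (pvOptB n1 n2 k - a) []).map (fun id2 => [id1, id2])))
      else []) := by
  unfold something_alt
  simp only []
  have hopt : (pvGrp n1).keys.foldl (fun o a =>
      (pvGrp n2).keys.foldl (fun o b => if o < a + b ∧ a + b ≤ k then a + b else o) o) 0
      = pvOptB n1 n2 k := by
    unfold pvOptB
    refine PySem.List.foldl_congr_mem _ _ _ _ ?_
    intro o a _
    rw [pvB_max (fun b => a + b) k (pvGrp n2).keys o]
    rfl
  show (if ((pvGrp n1).keys.foldl (fun o a =>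
      (pvGrp n2).keys.foldl (fun o b => if o < a + b ∧ a + b ≤ k then a + b else o) o) 0) ≤ k then
      (pvGrp n1).keys.foldl (fun ans a =>
        if (pvGrp n2).contains (((pvGrp n1).keys.foldl (fun o a =>
            (pvGrp n2).keys.foldl (fun o b => if o < a + b ∧ a + b ≤ k then a + b else o) o) 0) - a) then
          ((pvGrp n1).getD a []).foldl (fun acc id1 =>
            ((pvGrp n2).getD (((pvGrp n1).keys.foldl (fun o a =>
                (pvGrp n2).keys.foldl (fun o b => if o < a + b ∧ a + b ≤ k then a + b else o) o) 0) - a) []).foldl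
              (fun acc2 id2 => acc2 ++ [[id1, id2]]) acc) ans
        else ans) []
    else []) = _
  rw [hopt]
  by_cases hok : pvOptB n1 n2 k ≤ k
  · rw [if_pos hok, if_pos hok]
    have hfun : ∀ (ans : List (List Int)), ∀ a ∈ (pvGrp n1).keys,
        (if (pvGrp n2).contains (pvOptB n1 n2 k - a) then
          ((pvGrp n1).getD a []).foldl (fun acc id1 =>
            ((pvGrp n2).getD (pvOptB n1 n2 k - a) []).foldl
              (fun acc2 id2 => acc2 ++ [[id1, id2]]) acc) ans
        else ans)
        = (if (pvGrp n2).contains (pvOptB n1 n2 k - a) then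
            ans ++ ((pvGrp n1).getD a []).flatMap
              (fun id1 => ((pvGrp n2).getD (pvOptB n1 n2 k - a) []).map (fun id2 => [id1, id2]))
          else ans) := by
      intro ans a _
      by_cases hc : (pvGrp n2).contains (pvOptB n1 n2 k - a)
      · rw [if_pos hc, if_pos hc, pvPairs_fold]
      · rw [if_neg hc, if_neg hc]
    rw [PySem.List.foldl_congr_mem (pvGrp n1).keys _
        (fun (ans : List (List Int)) a =>
          if (pvGrp n2).contains (pvOptB n1 n2 k - a) then
            ans ++ ((pvGrp n1).getD a []).flatMap
              (fun id1 => ((pvGrp n2).getD (pvOptB n1 n2 k - a) []).map (fun id2 => [id1, id2]))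
          else ans) [] (fun ans a ha => hfun ans a ha)]
    rw [PySem.List.foldl_if_eq_foldl_filter]
    rw [PySem.List.foldl_append_eq_flatMap]
    simp
  · rw [if_neg hok, if_neg hok]

lemma pv_main (n1 n2 : List (Int × Int)) (k : Int) (h2 : n2 ≠ []) :
    something n1 n2 k = something_alt n1 n2 k := by
  rw [pvA_eval, pvB_eval]
  -- basic facts about the sorted distinct-value list of numbers2
  have hK2ne : (pvGrp n2).keys ≠ [] := by
    intro hnil
    obtain ⟨p, t, rfl⟩ := List.exists_cons_of_ne_nil h2
    have : p.2 ∈ (pvGrp (p :: t)).keys := (pvGrp_mem_keys _ _).2 (by simp)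
    rw [hnil] at this
    exact (List.not_mem_nil).elim this
  have hS2ne : pvS2 n2 ≠ [] := by
    unfold pvS2
    rw [Ne, PySem.List.sorted_eq_nil_iff]
    exact hK2ne
  have hS2sorted : (pvS2 n2).Pairwise (· ≤ ·) := by
    have := PySem.List.sorted_pairwise (pvGrp n2).keys (fun x => x)
    simpa [pvS2] using this
  have hS2mem : ∀ x, x ∈ pvS2 n2 ↔ x ∈ (pvGrp n2).keys :=
    fun x => PySem.List.mem_sorted (pvGrp n2).keys (fun x => x) false x
  have hLB : ∀ i : Int, pvB n2 k i ∈ pvS2 n2 ∧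
      ((∃ x ∈ pvS2 n2, x ≤ k - i) → pvIsBest (pvS2 n2) (k - i) (pvB n2 k i)) :=
    fun i => pvLB_top (pvS2 n2) hS2sorted hS2ne (k - i)
  -- properties of B's optimal
  have hOBdef : pvOptB n1 n2 k = (pvGrp n1).keys.foldl (fun o a => (pvG n2 k a).foldl max o) 0 := rfl
  obtain ⟨hOB0, hOBub', hOBmem'⟩ := pv_fold_max_props (pvG n2 k) (pvGrp n1).keys 0
  rw [← hOBdef] at hOB0 hOBub' hOBmem'
  have hOBub : ∀ a ∈ (pvGrp n1).keys, ∀ b ∈ (pvGrp n2).keys, a + b ≤ k → a + b ≤ pvOptB n1 n2 k := by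
    intro a ha b hb hs
    refine hOBub' a ha (a + b) ?_
    exact List.mem_map_of_mem (List.mem_filter.2 ⟨hb, by simpa⟩)
  have hOBmem : pvOptB n1 n2 k = 0 ∨
      ∃ a ∈ (pvGrp n1).keys, ∃ b ∈ (pvGrp n2).keys, a + b ≤ k ∧ pvOptB n1 n2 k = a + b := by
    rcases hOBmem' with h | ⟨a, ha, hm⟩
    · exact Or.inl h
    · obtain ⟨b, hb, hba⟩ := List.mem_map.1 hm
      obtain ⟨hbK, hbk⟩ := List.mem_filter.1 hb
      exact Or.inr ⟨a, ha, b, hbK, by simpa using hbk, hba.symm⟩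
  -- A's optimal equals B's optimal
  have hOAOB : pvOpt (pvCand n2 k) k (pvGrp n1).keys = pvOptB n1 n2 k := by
    apply le_antisymm
    · rcases pvOpt_mem (pvCand n2 k) k (pvGrp n1).keys with h | ⟨i, hiK, hik, hieq⟩
      · rw [h]; exact hOB0
      · have hbK2 : pvB n2 k i ∈ (pvGrp n2).keys := (hS2mem _).1 (hLB i).1
        simp only [pvCand] at hik hieq
        have := hOBub i hiK (pvB n2 k i) hbK2 (by omega)
        omega
    · rcases hOBmem with h | ⟨a, haK, b, hbK, hsum, heq⟩
      · rw [h]; exact pvOpt_nonneg _ _ _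
      · have hbS2 : b ∈ pvS2 n2 := (hS2mem b).2 hbK
        obtain ⟨_, hble, hbmax⟩ := (hLB a).2 ⟨b, hbS2, by omega⟩
        have h1 : b ≤ pvB n2 k a := hbmax b hbS2 (by omega)
        have h2 : pvCand n2 k a ≤ pvOpt (pvCand n2 k) k (pvGrp n1).keys :=
          pvOpt_ub _ _ _ a haK (by simp only [pvCand]; omega)
        simp only [pvCand] at h2
        omega
  rw [hOAOB]
  by_cases hok : pvOptB n1 n2 k ≤ k
  · rw [if_pos hok]
    -- on each key of numbers1, A's collection condition agrees with B's
    have hbeq : ∀ a, a ∈ (pvGrp n1).keys → pvOptB n1 n2 k - a ∈ (pvGrp n2).keys →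
        pvB n2 k a = pvOptB n1 n2 k - a := by
      intro a haK hmem
      have hS : pvOptB n1 n2 k - a ∈ pvS2 n2 := (hS2mem _).2 hmem
      obtain ⟨_, hble, hbmax⟩ := (hLB a).2 ⟨pvOptB n1 n2 k - a, hS, by omega⟩
      have h1 : pvOptB n1 n2 k - a ≤ pvB n2 k a := hbmax _ hS (by omega)
      have h2 : pvCand n2 k a ≤ pvOpt (pvCand n2 k) k (pvGrp n1).keys :=
        pvOpt_ub _ _ _ a haK (by simp only [pvCand]; omega)
      rw [hOAOB] at h2
      simp only [pvCand] at h2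
      omega
    have hiff : ∀ a ∈ (pvGrp n1).keys,
        ((pvCand n2 k a ≤ k ∧ pvCand n2 k a = pvOptB n1 n2 k) ↔
          pvOptB n1 n2 k - a ∈ (pvGrp n2).keys) := by
      intro a haK
      constructor
      · rintro ⟨hle, heq2⟩
        have hbK2 : pvB n2 k a ∈ (pvGrp n2).keys := (hS2mem _).1 (hLB a).1
        have : pvB n2 k a = pvOptB n1 n2 k - a := by simp only [pvCand] at heq2; omega
        rwa [this] at hbK2
      · intro hmem
        have hb := hbeq a haK hmem
        obtain ⟨_, hble, _⟩ := (hLB a).2 ⟨pvOptB n1 n2 k - a, (hS2mem _).2 hmem, by omega⟩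
        simp only [pvCand]
        omega
    have hfilter : (pvGrp n1).keys.filter (fun i => decide (pvCand n2 k i ≤ k) &&
          decide (pvCand n2 k i = pvOptB n1 n2 k))
        = (pvGrp n1).keys.filter (fun a => (pvGrp n2).contains (pvOptB n1 n2 k - a)) := by
      apply List.filter_congr
      intro a haK
      rw [PySem.Dict.contains_eq_decide_mem_keys]
      by_cases hx : pvOptB n1 n2 k - a ∈ (pvGrp n2).keys
      · obtain ⟨hA1, hA2⟩ := (hiff a haK).2 hx
        simp [hx, hA1, hA2, hok]
      · have h4 : ¬ (pvCand n2 k a ≤ k ∧ pvCand n2 k a = pvOptB n1 n2 k) :=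
          fun hxy => hx ((hiff a haK).1 hxy)
        by_cases hc1 : pvCand n2 k a ≤ k
        · have hc2 : ¬ pvCand n2 k a = pvOptB n1 n2 k := fun h => h4 ⟨hc1, h⟩
          simp [hx, hc1, hc2]
        · simp [hx, hc1]
    rw [hfilter]
    apply List.flatMap_congr  -- placeholder; adjusted below if the lemma name differs
    intro a ha
    obtain ⟨haK, hcont⟩ := List.mem_filter.1 ha
    have hmem : pvOptB n1 n2 k - a ∈ (pvGrp n2).keys := by
      rw [PySem.Dict.contains_eq_decide_mem_keys] at hcont
      simpa using hcont
    unfold pvP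
    rw [hbeq a haK hmem]
  · rw [if_neg hok]
    have hOBz : pvOptB n1 n2 k = 0 := by
      rcases hOBmem with h | ⟨_, _, _, _, hs, he⟩
      · exact h
      · omega
    have : (pvGrp n1).keys.filter (fun i => decide (pvCand n2 k i ≤ k) &&
        decide (pvCand n2 k i = pvOptB n1 n2 k)) = [] := by
      rw [List.filter_eq_nil_iff]
      intro i _
      simp only [Bool.and_eq_true, decide_eq_true_eq, not_and]
      intro hle
      omega
    rw [this, List.flatMap_nil]

-- ===== VERDICT (by name: the statement is the Claim_ definition above) =====
theorem something_spec : Claim_equal_something := by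
  intro n1 n2 k _ hpre
  unfold Spec_something
  by_cases h1 : n1 = []
  · subst h1
    rw [pvA_eval, pvB_eval]
    have hk : (pvGrp ([] : List (Int × Int))).keys = [] := rfl
    rw [hk]
    simp [pvOptB, hk]
  · have h2 : n2 ≠ [] := by
      rcases hpre with h | h
      · exact absurd h h1
      · exact h
    exact pv_main n1 n2 k h2
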